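-- pv_equiv track=rewrite | github.com/AdamZhouSE/pythonHomework | Code/CodeRecords/2914/60770/252372.py | check
-- ===== SOURCE A (Python) =====
-- def check(difs=[]):
--     var=0
--     ever=0
--     for dif in difs:
--         if dif<0:
--             return False
--         if dif==0 and var!=0:
--             ever=1
--         else:
--             if ever!=0:
--                 return False
--             else:
--                 if var==0:
--                     var=dif
--                     continue
--                 else:
--                     if dif!=var:
--                         return False
--
--     return True
-- ===== SOURCE B (Python) =====
-- def check(difs=[]):
--     n = len(difs)
--     i = 0
--     while i < n and difs[i] == 0:
--         i += 1
--     if i == n: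
--         return True
--     v = difs[i]
--     if v < 0:
--         return False
--     while i < n and difs[i] == v:
--         i += 1
--     return all(d == 0 for d in difs[i:])
-- ===== Notes on version B (the rewrite author's own statement) =====
-- stated objective: simpler
-- what changed: Replaces A's single-pass state machine with var/ever flags and per-element early returns by a three-phase decomposition: drop leading zeros, then drop the constant positive run, then check the remainder is all zeros.
import Mathlib
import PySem

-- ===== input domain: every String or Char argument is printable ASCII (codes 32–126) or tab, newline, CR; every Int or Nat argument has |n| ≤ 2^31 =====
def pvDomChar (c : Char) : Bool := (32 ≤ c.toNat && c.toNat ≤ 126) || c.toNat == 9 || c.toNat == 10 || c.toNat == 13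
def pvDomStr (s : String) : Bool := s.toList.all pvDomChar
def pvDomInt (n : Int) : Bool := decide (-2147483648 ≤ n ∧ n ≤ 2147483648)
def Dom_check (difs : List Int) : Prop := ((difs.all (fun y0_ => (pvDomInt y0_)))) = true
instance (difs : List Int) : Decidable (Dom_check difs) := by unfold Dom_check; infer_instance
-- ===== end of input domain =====

-- B is a simpler three-phase decomposition (skip leading zeros, skip the constant run, tail all zeros)
-- replacing A's var/ever state machine; return values agree on all inputs (A is total).

-- ===== PORT A =====
-- the for-loop of A with its two state variables var, ever
def checkLoop : List Int → Int → Int → Bool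
  | [], _, _ => true
  | dif :: rest, var, ever =>
    if dif < 0 then false
    else if dif == 0 && var != 0 then checkLoop rest var 1
    else if ever != 0 then false
    else if var == 0 then checkLoop rest dif ever
    else if dif != var then false
    else checkLoop rest var ever

def check (difs : List Int) : Bool := checkLoop difs 0 0

-- ===== PORT B =====
-- first while loop of Source B: advance i past leading zeros.
-- difs[i] is guarded by i < len(difs), so getD i 0 is exact.
def loopZeros (difs : List Int) (i : Nat) : Nat :=
  if i < difs.length ∧ difs.getD i 0 == 0 then loopZeros difs (i + 1) else i
termination_by difs.length - i
decreasing_by omega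

-- second while loop of Source B: advance i past the run of v (same guard)
def loopRun (difs : List Int) (v : Int) (i : Nat) : Nat :=
  if i < difs.length ∧ difs.getD i 0 == v then loopRun difs v (i + 1) else i
termination_by difs.length - i
decreasing_by omega

def check_alt (difs : List Int) : Bool :=
  let n := difs.length
  let i := loopZeros difs 0
  if i == n then true
  else
    let v := difs.getD i 0   -- difs[i], guarded: here i < n
    if v < 0 then false
    else
      let j := loopRun difs v i
      -- all(d == 0 for d in difs[j:]); the slice difs[j:] with 0 ≤ j is List.drop j
      (difs.drop j).all (fun d => d == 0)

-- ===== PRECONDITION & SPEC =====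
def Spec_check (difs : List Int) (out : Bool) : Prop := out = check_alt difs
instance (difs : List Int) (out : Bool) : Decidable (Spec_check difs out) := by unfold Spec_check; infer_instance

-- ===== CLAIM (what is proved, stated in full; the proofs are below) =====
def Claim_equal_check : Prop := ∀ (difs : List Int), Dom_check difs → Spec_check difs (check difs)

-- ===== LEMMAS AND PROOFS =====

-- declarative middle form: drop leading zeros, then the run of the head, tail must be zeros
def phasesP (l : List Int) : Bool :=
  match l.dropWhile (fun d => d == 0) with
  | [] => true
  | v :: _ =>
    if v < 0 then false
    else ((l.dropWhile (fun d => d == 0)).dropWhile (fun d => d == v)).all (fun d => d == 0)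

-- with ever = 1 (and the invariant var ≠ 0), A's loop accepts exactly the all-zero tails
theorem checkLoop_ever_one (l : List Int) (v : Int) (hv : v ≠ 0) :
    checkLoop l v 1 = l.all (fun d => d == 0) := by
  induction l with
  | nil => rfl
  | cons d l ih =>
    simp only [checkLoop, List.all_cons]
    by_cases h0 : d = 0
    · subst h0; simp [hv, ih]
    · by_cases hneg : d < 0
      · simp [hneg, h0]
      · simp [hneg, h0]

-- with ever = 0 and var = v > 0, A's loop accepts exactly "run of v then zeros"
theorem checkLoop_run (l : List Int) (v : Int) (hv : 0 < v) :
    checkLoop l v 0 = (l.dropWhile (fun d => d == v)).all (fun d => d == 0) := by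
  induction l with
  | nil => rfl
  | cons d l ih =>
    simp only [checkLoop, List.dropWhile_cons]
    by_cases hdv : d = v
    · subst hdv
      have h1 : ¬ d < 0 := by omega
      have h2 : d ≠ 0 := by omega
      simp [h1, h2, ih]
    · by_cases h0 : d = 0
      · subst h0
        have hv0 : v ≠ 0 := by omega
        simp [hv0, hdv, checkLoop_ever_one l v hv0]
      · by_cases hneg : d < 0
        · simp [hneg, hdv, h0]
        · simp [hneg, hdv, h0, hv.ne']

theorem checkLoop_eq_phases (l : List Int) : checkLoop l 0 0 = phasesP l := by
  induction l with
  | nil => rfl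
  | cons d l ih =>
    by_cases h0 : d = 0
    · subst h0
      simpa [checkLoop, phasesP, List.dropWhile_cons] using ih
    · by_cases hneg : d < 0
      · simp [checkLoop, phasesP, hneg, h0]
      · have hpos : 0 < d := by omega
        simp [checkLoop, phasesP, hneg, h0,
          checkLoop_run l d hpos]

-- the index loop computes the dropWhile boundary
theorem loopZeros_spec (l : List Int) (i : Nat) (hi : i ≤ l.length) :
    i ≤ loopZeros l i ∧ loopZeros l i ≤ l.length ∧
      l.drop (loopZeros l i) = (l.drop i).dropWhile (fun d => d == 0) := by
  unfold loopZeros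
  split
  · rename_i h
    obtain ⟨hlt, hz⟩ := h
    have hdrop : l.drop i = l[i] :: l.drop (i + 1) := List.drop_eq_getElem_cons hlt
    have hgd : l.getD i 0 = l[i] := List.getD_eq_getElem l 0 hlt
    have ih := loopZeros_spec l (i + 1) (by omega)
    refine ⟨by omega, ih.2.1, ?_⟩
    rw [ih.2.2, hdrop, List.dropWhile_cons]
    rw [hgd] at hz
    simp [hz]
  · rename_i h
    refine ⟨le_refl _, hi, ?_⟩
    rcases Nat.lt_or_ge i l.length with hlt | hge
    · have hgd : l.getD i 0 = l[i] := List.getD_eq_getElem l 0 hlt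
      have hz : ¬ (l.getD i 0 == 0) = true := fun hc => h ⟨hlt, hc⟩
      have hdrop : l.drop i = l[i] :: l.drop (i + 1) := List.drop_eq_getElem_cons hlt
      rw [hdrop, List.dropWhile_cons]
      rw [hgd] at hz
      simp [hz]
    · have : l.drop i = [] := List.drop_eq_nil_of_le hge
      simp [this]
termination_by l.length - i
decreasing_by omega

theorem loopRun_spec (l : List Int) (v : Int) (i : Nat) (hi : i ≤ l.length) :
    i ≤ loopRun l v i ∧ loopRun l v i ≤ l.length ∧
      l.drop (loopRun l v i) = (l.drop i).dropWhile (fun d => d == v) := by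
  unfold loopRun
  split
  · rename_i h
    obtain ⟨hlt, hz⟩ := h
    have hdrop : l.drop i = l[i] :: l.drop (i + 1) := List.drop_eq_getElem_cons hlt
    have hgd : l.getD i 0 = l[i] := List.getD_eq_getElem l 0 hlt
    have ih := loopRun_spec l v (i + 1) (by omega)
    refine ⟨by omega, ih.2.1, ?_⟩
    rw [ih.2.2, hdrop, List.dropWhile_cons]
    rw [hgd] at hz
    simp [hz]
  · rename_i h
    refine ⟨le_refl _, hi, ?_⟩
    rcases Nat.lt_or_ge i l.length with hlt | hge
    · have hgd : l.getD i 0 = l[i] := List.getD_eq_getElem l 0 hlt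
      have hz : ¬ (l.getD i 0 == v) = true := fun hc => h ⟨hlt, hc⟩
      have hdrop : l.drop i = l[i] :: l.drop (i + 1) := List.drop_eq_getElem_cons hlt
      rw [hdrop, List.dropWhile_cons]
      rw [hgd] at hz
      simp [hz]
    · have : l.drop i = [] := List.drop_eq_nil_of_le hge
      simp [this]
termination_by l.length - i
decreasing_by omega

theorem check_alt_eq_phases (l : List Int) : check_alt l = phasesP l := by
  unfold check_alt phasesP
  obtain ⟨h0i, hiN, hdropi⟩ := loopZeros_spec l 0 (Nat.zero_le _)
  simp only [List.drop_zero] at hdropi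
  set i := loopZeros l 0 with hi
  by_cases hend : i = l.length
  · have hnil : l.dropWhile (fun d => d == 0) = [] := by
      rw [← hdropi, hend, List.drop_length]
    simp [hnil, hend]
  · have hlt : i < l.length := by omega
    have hgd : l.getD i 0 = l[i] := List.getD_eq_getElem l 0 hlt
    have hdrop : l.drop i = l[i] :: l.drop (i + 1) := List.drop_eq_getElem_cons hlt
    have hcons : l.dropWhile (fun d => d == 0) = l[i] :: l.drop (i + 1) := by
      rw [← hdropi, hdrop]
    have hne : (i == l.length) = false := by simp [hend]
    have hdj := (loopRun_spec l (l[i]) i (le_of_lt hlt)).2.2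
    rw [hcons]
    simp only [hne, Bool.false_eq_true, if_false]
    rw [hgd]
    split_ifs with hv
    · rfl
    · rw [hdj, hdrop]
-- ===== VERDICT (by name: the statement is the Claim_ definition above) =====
theorem check_spec : Claim_equal_check := by
  intro difs _
  show check difs = check_alt difs
  rw [check, checkLoop_eq_phases, check_alt_eq_phases]
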